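-- pv_equiv track=rewrite | github.com/mariapacifico/CSE231 | proj09.py | top_methods_by_sector
-- ===== SOURCE A (Python) =====
-- def top_methods_by_sector(dictionary):
--     '''
--         This function counts how many instances a method had occured in
--         each sector
--         Returns a dict
--     '''
--
--     master_dict = {}
--
--     #get sector and method from original dict
--     for keys, values in dictionary.items():
--         for lists in values:
--             sector_dicts = lists[1]
--             for values in sector_dicts.values():
--
--                 sector = values[0]
--                 method = values[1]
--
--                 #put sector and method in nested dict
--                 #count how many times the method occurs
--                 if sector in master_dict:
--
--                     if method in master_dict[sector]:
--                         master_dict[sector][method] += 1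
--                     else:
--                         master_dict[sector][method] = 1
--
--                 else:
--                     master_dict[sector] = {}
--                     master_dict[sector][method] = 1
--
--     #sort the sectors in alaphabetical order and add to a different dict
--     #keeping the same values with each key
--     top_methods_dict = {}
--     sector_list = []
--
--     for keys in master_dict:
--         sector_list.append(keys)
--
--     sector_list.sort()
--
--     for sector in sector_list:
--         top_methods_dict[sector] = master_dict[sector]
--
--     return top_methods_dict
-- ===== SOURCE B (Python) =====
-- def top_methods_by_sector(dictionary):
--     # Flatten to sector-method pairs, stable-sort by sector, then build the
--     # result in one linear scan over the sorted runs.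
--     pairs = [(vals[0], vals[1])
--              for value in dictionary.values()
--              for lists in value
--              for vals in lists[1].values()]
--     pairs.sort(key=lambda p: p[0])
--     result = {}
--     i, n = 0, len(pairs)
--     while i < n:
--         sector = pairs[i][0]
--         counts = {}
--         while i < n and pairs[i][0] == sector:
--             method = pairs[i][1]
--             counts[method] = counts.get(method, 0) + 1
--             i += 1
--         result[sector] = counts
--     return result
-- ===== Notes on version B (the rewrite author's own statement) =====
-- stated objective: alternative
-- what changed: Replaces A's nested-dict accumulation (per-pair membership tests updating a dict of dicts, then a separate key-sort and rebuild) by flattening to sector-method pairs, one stable sort by sector, and a single linear run-scan that counts each sector's methods in order.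
import Mathlib
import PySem

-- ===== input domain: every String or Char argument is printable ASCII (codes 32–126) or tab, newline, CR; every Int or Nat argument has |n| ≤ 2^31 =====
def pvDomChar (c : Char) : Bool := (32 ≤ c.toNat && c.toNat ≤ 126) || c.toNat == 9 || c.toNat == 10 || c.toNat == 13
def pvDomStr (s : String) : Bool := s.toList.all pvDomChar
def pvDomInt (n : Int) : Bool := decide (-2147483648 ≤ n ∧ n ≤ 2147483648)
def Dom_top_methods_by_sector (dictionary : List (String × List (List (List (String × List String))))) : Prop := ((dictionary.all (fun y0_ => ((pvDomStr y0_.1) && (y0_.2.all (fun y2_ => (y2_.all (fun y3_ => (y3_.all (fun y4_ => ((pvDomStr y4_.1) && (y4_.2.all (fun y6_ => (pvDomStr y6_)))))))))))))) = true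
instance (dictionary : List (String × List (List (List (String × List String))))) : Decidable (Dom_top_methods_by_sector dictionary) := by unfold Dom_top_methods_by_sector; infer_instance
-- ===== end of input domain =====

-- B replaces A's nested-dict accumulation by flatten / stable sort by sector / one
-- linear run-scan that counts methods; same return value (alternative decomposition).

-- ===== PORT A =====
-- innermost loop body: one `values` list of a sector dict
def pvStepA (m : PySem.Dict String (PySem.Dict String Int)) (vals : List String) :
    PySem.Dict String (PySem.Dict String Int) :=
  let sector := PySem.List.pyGetD vals 0 ""
  let method := PySem.List.pyGetD vals 1 ""
  if m.contains sector then
    if (m.getD sector PySem.Dict.empty).contains method then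
      m.insert sector ((m.getD sector PySem.Dict.empty).insert method
        ((m.getD sector PySem.Dict.empty).getD method 0 + 1))
    else
      m.insert sector ((m.getD sector PySem.Dict.empty).insert method 1)
  else
    m.insert sector (PySem.Dict.empty.insert method 1)

def top_methods_by_sector (dictionary : List (String × List (List (List (String × List String))))) : List (String × List (String × Int)) :=
  let master := (PySem.Dict.ofList dictionary).items.foldl (fun m kv =>
      kv.2.foldl (fun m lists =>
        ((PySem.Dict.ofList (PySem.List.pyGetD lists 1 [])).values).foldl pvStepA m) m)
    PySem.Dict.empty
  let sector_list := master.keys.foldl (fun acc k => acc ++ [k]) ([] : List String)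
  let sector_sorted := PySem.List.sorted sector_list (fun x => x) false
  let top := sector_sorted.foldl (fun d s => d.insert s (master.getD s PySem.Dict.empty))
    (PySem.Dict.empty : PySem.Dict String (PySem.Dict String Int))
  top.items.map (fun p => (p.1, p.2.items))

-- ===== PORT B =====
def pvToPair (vals : List String) : String × String :=
  (PySem.List.pyGetD vals 0 "", PySem.List.pyGetD vals 1 "")

-- the two nested while-loops of Source B: consume one sorted run per outer step,
-- counting its methods with the inner loop
def pvGroupRuns : List (String × String) → List (String × List (String × Int))
  | [] => []
  | p :: rest =>
    let run := rest.takeWhile (fun q => q.1 == p.1)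
    let counts := (p.2 :: run.map (·.2)).foldl
      (fun d t => d.insert t (d.getD t 0 + 1)) (PySem.Dict.empty : PySem.Dict String Int)
    (p.1, counts.items) :: pvGroupRuns (rest.dropWhile (fun q => q.1 == p.1))
termination_by l => l.length
decreasing_by
  simpa [Nat.lt_succ_iff] using List.length_dropWhile_le (fun q => q.1 == p.1) rest

def top_methods_by_sector_alt (dictionary : List (String × List (List (List (String × List String))))) : List (String × List (String × Int)) :=
  let pairs := (PySem.Dict.ofList dictionary).items.flatMap (fun kv =>
    kv.2.flatMap (fun lists =>
      ((PySem.Dict.ofList (PySem.List.pyGetD lists 1 [])).values).map pvToPair))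
  pvGroupRuns (PySem.List.sorted pairs (fun p => p.1) false)

-- ===== PRECONDITION & SPEC =====
-- Pre_ excludes exactly the inputs where the Python A raises IndexError:
-- some `lists` has fewer than 2 entries (lists[1]), or some value list of the
-- dict lists[1] has fewer than 2 entries (values[0] / values[1]).
def Pre_top_methods_by_sector (dictionary : List (String × List (List (List (String × List String))))) : Prop :=
  ∀ kv ∈ (PySem.Dict.ofList dictionary).items, ∀ lists ∈ kv.2,
    2 ≤ lists.length ∧
    ∀ e ∈ (PySem.Dict.ofList (lists.getD 1 [])).items, 2 ≤ e.2.length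
instance (dictionary : List (String × List (List (List (String × List String))))) : Decidable (Pre_top_methods_by_sector dictionary) := by unfold Pre_top_methods_by_sector; infer_instance

def pvWitness_top_methods_by_sector : (List (String × List (List (List (String × List String))))) :=
  [("k", [[[], [("a", ["Tech", "m1"]), ("b", ["Tech", "m2"])]]])]

def Spec_top_methods_by_sector (dictionary : List (String × List (List (List (String × List String))))) (out : List (String × List (String × Int))) : Prop := out = top_methods_by_sector_alt dictionary
instance (dictionary : List (String × List (List (List (String × List String))))) (out : List (String × List (String × Int))) : Decidable (Spec_top_methods_by_sector dictionary out) := by unfold Spec_top_methods_by_sector; infer_instance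

-- ===== CLAIM (what is proved, stated in full; the proofs are below) =====
def Claim_equal_top_methods_by_sector : Prop := ∀ (dictionary : List (String × List (List (List (String × List String))))), Dom_top_methods_by_sector dictionary → Pre_top_methods_by_sector dictionary → Spec_top_methods_by_sector dictionary (top_methods_by_sector dictionary)

-- ===== LEMMAS AND PROOFS =====

-- A's per-pair step, written as a single keyed insert (value chosen by A's branches)
def pvInner (m : PySem.Dict String (PySem.Dict String Int)) (p : String × String) :
    PySem.Dict String Int :=
  if m.contains p.1 then
    if (m.getD p.1 PySem.Dict.empty).contains p.2 then
      (m.getD p.1 PySem.Dict.empty).insert p.2 ((m.getD p.1 PySem.Dict.empty).getD p.2 0 + 1)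
    else
      (m.getD p.1 PySem.Dict.empty).insert p.2 1
  else
    PySem.Dict.empty.insert p.2 1

def pvStep2 (m : PySem.Dict String (PySem.Dict String Int)) (p : String × String) :
    PySem.Dict String (PySem.Dict String Int) :=
  m.insert p.1 (pvInner m p)

lemma pvStepA_eq (m : PySem.Dict String (PySem.Dict String Int)) (vals : List String) :
    pvStepA m vals = pvStep2 m (pvToPair vals) := by
  simp only [pvStepA, pvStep2, pvInner, pvToPair]
  split_ifs <;> rfl

lemma pv_foldl_flatMap {α β γ : Type} (l : List α) (g : α → List β) (f : γ → β → γ) (i : γ) :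
    (l.flatMap g).foldl f i = l.foldl (fun a x => (g x).foldl f a) i := by
  induction l generalizing i with
  | nil => rfl
  | cons x xs ih => simp [List.foldl_append, ih]

lemma pv_ofList_sublist {α : Type} [BEq α] [LawfulBEq α] (xs : List α) : (PySem.Set.ofList xs).Sublist xs := by
  induction xs with
  | nil => simp [PySem.Set.ofList_nil]
  | cons x t ih =>
    rw [PySem.Set.ofList_cons, PySem.Set.discard]
    exact ((List.filter_sublist).trans ih).cons₂ x

lemma pv_discard_notmem (s : String) (ks : List String) (h : s ∉ ks) :
    PySem.Set.discard (PySem.Set.ofList ks) s = PySem.Set.ofList ks := by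
  rw [PySem.Set.discard]
  apply List.filter_eq_self.mpr
  intro a ha
  have : a ∈ ks := (PySem.Set.mem_ofList ks a).mp ha
  simp only [Bool.not_eq_eq_eq_not, Bool.not_true, beq_eq_false_iff_ne, ne_eq]
  rintro rfl; exact h this

lemma pv_discard_ofList (s : String) (ks₁ ks₂ : List String)
    (h1 : ∀ k ∈ ks₁, k = s) (h2 : s ∉ ks₂) :
    PySem.Set.discard (PySem.Set.ofList (ks₁ ++ ks₂)) s = PySem.Set.ofList ks₂ := by
  induction ks₁ with
  | nil => simpa using pv_discard_notmem s ks₂ h2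
  | cons k t ih =>
    have hk : k = s := h1 k (by simp)
    subst hk
    rw [List.cons_append, PySem.Set.ofList_cons]
    rw [ih (fun k hk => h1 k (by simp [hk]))]
    rw [PySem.Set.discard, List.filter_cons]
    simp only [BEq.refl, Bool.not_true, Bool.false_eq_true, if_false]
    exact pv_discard_notmem _ ks₂ h2

lemma pvInner_eq (m : PySem.Dict String (PySem.Dict String Int)) (p : String × String) :
    pvInner m p = (m.getD p.1 PySem.Dict.empty).insert p.2
      ((m.getD p.1 PySem.Dict.empty).getD p.2 0 + 1) := by
  unfold pvInner
  split_ifs with h1 h2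
  · rfl
  · rw [PySem.Dict.getD_of_not_contains (m.getD p.1 PySem.Dict.empty) 0 (by simpa using h2)]
    norm_num
  · rw [PySem.Dict.getD_of_not_contains m PySem.Dict.empty (by simpa using h1),
      PySem.Dict.getD_empty]
    norm_num

lemma pvStep2_getD (s : String) (Q : List (String × String)) :
    ∀ m : PySem.Dict String (PySem.Dict String Int),
    (Q.foldl pvStep2 m).getD s PySem.Dict.empty =
      ((Q.filter (fun p => p.1 == s)).map (·.2)).foldl
        (fun d t => d.insert t (d.getD t 0 + 1)) (m.getD s PySem.Dict.empty) := by
  induction Q with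
  | nil => intro m; rfl
  | cons p Q ih =>
    intro m
    rw [List.foldl_cons, ih, List.filter_cons]
    by_cases hp : p.1 = s
    · simp only [hp, BEq.refl, if_true, List.map_cons, List.foldl_cons]
      congr 1
      rw [pvStep2, PySem.Dict.getD_insert, if_pos hp.symm, pvInner_eq, hp]
    · rw [if_neg (by simpa using hp)]
      congr 1
      rw [pvStep2, PySem.Dict.getD_insert, if_neg (fun h => hp h.symm)]

lemma pv_pairwise_insertBy {α : Type} (key : α → String) (x : α) (acc : List α)
    (h : acc.Pairwise (fun a b => key a ≤ key b)) :
    (PySem.List.insertBy (fun a b => decide (key a < key b)) x acc).Pairwise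
      (fun a b => key a ≤ key b) := by
  induction acc with
  | nil => simp [PySem.List.insertBy]
  | cons y ys ih =>
    rw [PySem.List.insertBy]
    rcases List.pairwise_cons.mp h with ⟨hy, hys⟩
    split_ifs with hlt
    · refine List.pairwise_cons.mpr ⟨?_, h⟩
      intro z hz
      rcases List.mem_cons.mp hz with rfl | hz
      · exact le_of_lt (by simpa using hlt)
      · exact le_trans (le_of_lt (by simpa using hlt)) (hy z hz)
    · refine List.pairwise_cons.mpr ⟨?_, ih hys⟩
      intro z hz
      rcases (PySem.List.mem_insertBy _ _ _ _).mp hz with rfl | hz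
      · exact le_of_not_gt (by simpa using hlt)
      · exact hy z hz

lemma pv_filter_insertBy {α : Type} (key : α → String) (c : String) (x : α) (acc : List α)
    (h : acc.Pairwise (fun a b => key a ≤ key b)) :
    (PySem.List.insertBy (fun a b => decide (key a < key b)) x acc).filter (fun y => key y == c) =
      if key x == c then acc.filter (fun y => key y == c) ++ [x]
      else acc.filter (fun y => key y == c) := by
  induction acc with
  | nil => rw [PySem.List.insertBy]; simp [List.filter_cons]
  | cons y ys ih =>
    rw [PySem.List.insertBy]
    rcases List.pairwise_cons.mp h with ⟨hy, hys⟩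
    by_cases hlt : key x < key y
    · rw [if_pos (by simpa using hlt)]
      by_cases hxc : key x = c
      · have hemp : (y :: ys).filter (fun z => key z == c) = [] := by
          apply List.filter_eq_nil_iff.mpr
          intro z hz
          have hk : key x < key z := by
            rcases List.mem_cons.mp hz with rfl | hz
            · exact hlt
            · exact lt_of_lt_of_le hlt (hy z hz)
          simp only [beq_iff_eq]
          intro hzc; rw [← hxc] at hzc; exact absurd hzc (ne_of_gt hk)
        rw [if_pos (by simpa using hxc), List.filter_cons, if_pos (by simpa using hxc), hemp]
        simp
      · rw [if_neg (by simpa using hxc), List.filter_cons, if_neg (by simpa using hxc)]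
    · rw [if_neg (by simpa using hlt), List.filter_cons, ih hys, List.filter_cons]
      by_cases hyc : key y = c <;> by_cases hxc : key x = c <;> simp [hyc, hxc]

lemma pv_filter_foldl_insertBy {α : Type} (key : α → String) (c : String) :
    ∀ (xs acc : List α), acc.Pairwise (fun a b => key a ≤ key b) →
    ((xs.foldl (fun acc x => PySem.List.insertBy (fun a b => decide (key a < key b)) x acc) acc).filter (fun y => key y == c)) =
      acc.filter (fun y => key y == c) ++ xs.filter (fun y => key y == c) := by
  intro xs
  induction xs with
  | nil => intro acc _; simp
  | cons x xs ih =>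
    intro acc hacc
    rw [List.foldl_cons, ih _ (pv_pairwise_insertBy key x acc hacc),
      pv_filter_insertBy key c x acc hacc, List.filter_cons]
    by_cases hxc : key x = c <;> simp [hxc]

lemma pv_filter_sorted {α : Type} (key : α → String) (c : String) (xs : List α) :
    (PySem.List.sorted xs key false).filter (fun y => key y == c) =
      xs.filter (fun y => key y == c) := by
  rw [PySem.List.sorted_eq_foldl_insertBy]
  simpa using pv_filter_foldl_insertBy key c xs [] (by simp)

lemma pv_groupRuns_spec : ∀ (S : List (String × String)),
    S.Pairwise (fun a b => a.1 ≤ b.1) →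
    pvGroupRuns S = (PySem.Set.ofList (S.map (·.1))).map (fun s =>
      (s, (PySem.Dict.counter ((S.filter (fun p => p.1 == s)).map (·.2))).items)) := by
  intro S
  induction S using pvGroupRuns.induct with
  | case1 => intro _; simp [pvGroupRuns, PySem.Set.ofList_nil]
  | case2 p rest ih =>
    intro h
    rcases List.pairwise_cons.mp h with ⟨hy, hrest⟩
    have hsplit : rest.takeWhile (fun q => q.1 == p.1) ++ rest.dropWhile (fun q => q.1 == p.1) = rest :=
      List.takeWhile_append_dropWhile
    have f1 : ∀ q ∈ rest.takeWhile (fun q => q.1 == p.1), q.1 = p.1 := by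
      intro q hq
      simpa using List.mem_takeWhile_imp hq
    have f2 : (rest.dropWhile (fun q => q.1 == p.1)).Pairwise (fun a b => a.1 ≤ b.1) :=
      hrest.sublist (List.dropWhile_sublist _)
    have f3 : p.1 ∉ (rest.dropWhile (fun q : String × String => q.1 == p.1)).map (·.1) := by
      intro hmem
      rcases List.mem_map.mp hmem with ⟨z, hz, hz1⟩
      match hre : rest.dropWhile (fun q : String × String => q.1 == p.1), hz, f2 with
      | [], hz, _ => simp at hz
      | w :: tail, hz, f2 =>
        have hne : rest.dropWhile (fun q : String × String => q.1 == p.1) ≠ [] := by rw [hre]; simp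
        have hwf := List.head_dropWhile_not (fun q : String × String => q.1 == p.1) hne
        have hhead : (List.dropWhile (fun q : String × String => q.1 == p.1) rest).head hne = w := by
          simp [hre]
        rw [hhead] at hwf
        simp only [beq_eq_false_iff_ne, ne_eq] at hwf
        have hwmem : w ∈ rest := (List.dropWhile_sublist _).subset (by rw [hre]; simp)
        have hwlt : p.1 < w.1 := lt_of_le_of_ne (hy w hwmem) (Ne.symm hwf)
        rcases List.mem_cons.mp hz with rfl | hz2
        · exact absurd hz1 (ne_of_gt hwlt)
        · have hle : w.1 ≤ z.1 := (List.pairwise_cons.mp f2).1 z hz2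
          exact absurd hz1 (ne_of_gt (lt_of_lt_of_le hwlt hle))
    have f5 : PySem.Set.ofList ((p :: rest).map (·.1)) =
        p.1 :: PySem.Set.ofList ((rest.dropWhile (fun q => q.1 == p.1)).map (·.1)) := by
      rw [List.map_cons, PySem.Set.ofList_cons]
      conv_lhs => rw [← hsplit]
      rw [List.map_append,
        pv_discard_ofList p.1 _ _
          (by intro k hk; rcases List.mem_map.mp hk with ⟨q, hq, rfl⟩; exact f1 q hq) f3]
    have f7 : (p :: rest).filter (fun q => q.1 == p.1) = p :: rest.takeWhile (fun q => q.1 == p.1) := by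
      rw [List.filter_cons, if_pos (by simp)]
      congr 1
      have e1 : (rest.takeWhile (fun q => q.1 == p.1)).filter (fun q => q.1 == p.1) =
          rest.takeWhile (fun q => q.1 == p.1) :=
        List.filter_eq_self.mpr (fun q hq => by simp [f1 q hq])
      have e2 : (rest.dropWhile (fun q => q.1 == p.1)).filter (fun q => q.1 == p.1) = [] :=
        List.filter_eq_nil_iff.mpr (fun q hq => by
          simp only [beq_iff_eq]
          intro hq1; exact f3 (List.mem_map.mpr ⟨q, hq, hq1⟩))
      conv_lhs => rw [← hsplit]
      rw [List.filter_append, e1, e2, List.append_nil]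
    have f8 : ∀ s ∈ PySem.Set.ofList ((rest.dropWhile (fun q => q.1 == p.1)).map (·.1)),
        (p :: rest).filter (fun q => q.1 == s) =
          (rest.dropWhile (fun q => q.1 == p.1)).filter (fun q => q.1 == s) := by
      intro s hs
      have hs' : s ∈ (rest.dropWhile (fun q => q.1 == p.1)).map (·.1) :=
        (PySem.Set.mem_ofList _ _).mp hs
      have hne : s ≠ p.1 := fun h => f3 (h ▸ hs')
      rw [List.filter_cons, if_neg (by simpa using fun h => hne h.symm)]
      have e1 : (rest.takeWhile (fun q => q.1 == p.1)).filter (fun q => q.1 == s) = [] :=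
        List.filter_eq_nil_iff.mpr (fun q hq => by
          simp only [beq_iff_eq]
          intro hq1; exact hne (by rw [← hq1, f1 q hq]))
      conv_lhs => rw [← hsplit]
      rw [List.filter_append, e1, List.nil_append]
    rw [pvGroupRuns, f5, List.map_cons]
    congr 1
    · rw [f7]
      simp only [List.map_cons]
      congr 2
    · rw [ih f2]
      exact (List.map_congr_left (fun s hs => by rw [f8 s hs])).symm

-- ===== VERDICT (by name: the statement is the Claim_ definition above) =====
theorem top_methods_by_sector_spec : Claim_equal_top_methods_by_sector := by
  intro dictionary _dom _pre
  unfold Spec_top_methods_by_sector top_methods_by_sector top_methods_by_sector_alt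
  simp only []
  -- shared flattened data
  set items := (PySem.Dict.ofList dictionary).items with hitems
  set Vl : List (List String) := items.flatMap (fun kv =>
    kv.2.flatMap (fun lists => (PySem.Dict.ofList (PySem.List.pyGetD lists 1 [])).values)) with hVl
  set P : List (String × String) := Vl.map pvToPair with hP
  -- A's master dict is a fold of pvStep2 over the flat pair list P
  have hnest : items.foldl (fun m kv =>
      kv.2.foldl (fun m lists =>
        ((PySem.Dict.ofList (PySem.List.pyGetD lists 1 [])).values).foldl pvStepA m) m)
      PySem.Dict.empty = P.foldl pvStep2 PySem.Dict.empty := by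
    rw [hP, List.foldl_map, hVl, pv_foldl_flatMap]
    refine PySem.List.foldl_congr_mem _ _ _ _ ?_
    intro acc kv _
    rw [pv_foldl_flatMap]
    exact PySem.List.foldl_congr_mem _ _ _ _ (fun a lists _ =>
      PySem.List.foldl_congr_mem _ _ _ _ (fun a2 v _ => pvStepA_eq a2 v))
  rw [hnest]
  set master := P.foldl pvStep2 PySem.Dict.empty with hmaster
  -- keys of master
  have hkeys : master.keys = PySem.Set.ofList (P.map (fun p => p.1)) := by
    rw [hmaster]
    have hshape : ∀ (d : PySem.Dict String (PySem.Dict String Int)),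
        P.foldl pvStep2 d = P.foldl (fun d x => d.insert x.1 (pvInner d x)) d := fun d => rfl
    rw [hshape, PySem.Dict.keys_foldl_insert_key P (fun p => p.1) pvInner PySem.Dict.empty]
    rw [PySem.Dict.keys_empty, PySem.Set.update_nil_left]
  -- sector_list loop is just master.keys
  have hsl : master.keys.foldl (fun acc k => acc ++ [k]) ([] : List String) = master.keys := by
    simpa using PySem.List.foldl_append_singleton_eq_self master.keys ([] : List String)
  rw [hsl, hkeys]
  set ss := PySem.List.sorted (PySem.Set.ofList (P.map (fun p => p.1))) (fun x => x) false with hss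
  have hssperm : ss.Perm (PySem.Set.ofList (P.map (fun p => p.1))) :=
    PySem.List.sorted_perm _ _ _
  have hssnd : ss.Nodup := (hssperm.nodup_iff).mpr (PySem.Set.nodup_ofList _)
  -- the final dict build appends fresh keys
  have htop : (ss.foldl (fun d s => d.insert s (master.getD s PySem.Dict.empty))
      (PySem.Dict.empty : PySem.Dict String (PySem.Dict String Int))).items =
      ss.map (fun s => (s, master.getD s PySem.Dict.empty)) := by
    have := PySem.Dict.items_foldl_insert_fresh ss (fun s => s)
      (fun s => master.getD s PySem.Dict.empty) PySem.Dict.empty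
      (fun a _ => PySem.Dict.contains_empty a) (by simpa using hssnd)
    simpa using this
  rw [htop, List.map_map]
  -- per-sector contents of master
  have hgetD : ∀ s, master.getD s PySem.Dict.empty =
      PySem.Dict.counter ((P.filter (fun p => p.1 == s)).map (fun p => p.2)) := by
    intro s
    rw [hmaster, pvStep2_getD s P PySem.Dict.empty, PySem.Dict.getD_empty,
      PySem.Dict.foldl_insert_getD_add_one_eq_counter]
  -- B side
  have hpairs : items.flatMap (fun kv => kv.2.flatMap (fun lists =>
      ((PySem.Dict.ofList (PySem.List.pyGetD lists 1 [])).values).map pvToPair)) = P := by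
    rw [hP, hVl]
    simp [List.map_flatMap]
  rw [hpairs]
  set S := PySem.List.sorted P (fun p => p.1) false with hS
  have hSpw : S.Pairwise (fun a b => a.1 ≤ b.1) :=
    PySem.List.sorted_pairwise P (fun p => p.1)
  rw [pv_groupRuns_spec S hSpw]
  -- keys agree
  have hkeyeq : PySem.Set.ofList (S.map (fun p => p.1)) = ss := by
    rw [hss]
    refine (PySem.List.sorted_eq_of_perm_of_pairwise_lt _ _ (fun x => x) ?_ ?_).symm
    · refine (List.perm_ext_iff_of_nodup (PySem.Set.nodup_ofList _) (PySem.Set.nodup_ofList _)).mpr ?_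
      intro a
      rw [PySem.Set.mem_ofList, PySem.Set.mem_ofList]
      exact ((PySem.List.sorted_perm P (fun p => p.1) false).map (fun p => p.1)).mem_iff
    · have h1 : (S.map (fun p => p.1)).Pairwise (fun a b => a ≤ b) :=
        List.pairwise_map.mpr hSpw
      have h2 : (PySem.Set.ofList (S.map (fun p => p.1))).Pairwise (fun a b => a ≤ b) :=
        h1.sublist (pv_ofList_sublist _)
      have h3 : (PySem.Set.ofList (S.map (fun p => p.1))).Pairwise (fun a b => a ≠ b) :=
        PySem.Set.nodup_ofList _
      exact (h2.and h3).imp (fun hab => lt_of_le_of_ne hab.1 hab.2)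
  rw [hkeyeq]
  -- stable sort: per-sector pairs are unchanged
  apply List.map_congr_left
  intro s _
  have hstab : S.filter (fun p => p.1 == s) = P.filter (fun p => p.1 == s) := by
    rw [hS]
    exact pv_filter_sorted (fun p => p.1) s P
  simp only [Function.comp_apply]
  rw [hgetD s, hstab]
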